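-- pv_equiv track=rewrite | github.com/HN67/advent | advent/year2021/day7.py | optimal_triangle_target
-- ===== SOURCE A (Python) =====
-- import collections.abc as c
-- import functools
--
-- def triangle(base: int) -> int:
--     """The `base`-th triangle number.
--
--     Equivalent to indicing the sequence [0, 1, 3, 6...
--     """
--     return base * (base + 1) // 2
--
-- def triangle_cost(positions: c.Iterable[int], target: int = 0) -> int:
--     """The total cost (triangle of distance) to align each position to the target."""
--     return sum(triangle(abs(pos - target)) for pos in positions)
--
-- def optimal_triangle_target(positions: c.Iterable[int]) -> int:
--     """The optimal alignment target, based on triangle distance."""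
--     # Ensure we can iterate multiple times
--     positions = tuple(positions)
--     return min(
--         (
--             target
--             for target in range(
--                 min(positions),
--                 max(positions) + 1,
--             )
--         ),
--         key=functools.partial(triangle_cost, positions),
--     )
-- ===== SOURCE B (Python) =====
-- def optimal_triangle_target(positions):
--     """The optimal alignment target, based on triangle distance."""
--     positions = tuple(positions)
--     lo, hi = min(positions), max(positions)
--
--     def doubled_cost(target):
--         # 2 * sum(triangle(|p - target|)) == sum(d*d + |d|)
--         return sum(d * d + abs(d) for d in (p - target for p in positions))
--
--     # doubled_cost is strictly convex, so binary-search the first t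
--     # with cost(t) <= cost(t+1): that is the smallest minimizer.
--     while lo < hi:
--         mid = (lo + hi) // 2
--         if doubled_cost(mid) <= doubled_cost(mid + 1):
--             hi = mid
--         else:
--             lo = mid + 1
--     return lo
-- ===== Notes on version B (the rewrite author's own statement) =====
-- stated objective: faster
-- what changed: Replaces the full scan of every target in [min,max] with O(n) cost each by a binary search over the strictly convex doubled cost (d*d+|d| per element, no triangle/divide), evaluating O(log R) targets.
import Mathlib
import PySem

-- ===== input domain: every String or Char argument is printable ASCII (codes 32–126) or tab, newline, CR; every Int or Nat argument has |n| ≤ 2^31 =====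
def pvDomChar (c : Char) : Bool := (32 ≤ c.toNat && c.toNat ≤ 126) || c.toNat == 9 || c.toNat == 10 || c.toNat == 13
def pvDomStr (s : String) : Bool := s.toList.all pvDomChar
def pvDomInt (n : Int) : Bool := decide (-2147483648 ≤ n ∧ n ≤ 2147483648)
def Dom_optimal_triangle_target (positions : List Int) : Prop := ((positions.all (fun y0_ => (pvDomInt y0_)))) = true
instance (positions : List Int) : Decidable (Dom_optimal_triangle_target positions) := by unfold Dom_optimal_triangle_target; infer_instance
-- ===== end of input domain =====

-- B replaces A's full scan of every target in [min,max] by a binary search over the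
-- strictly convex doubled cost (objective: faster, O(n log R) instead of O(R*n)).

-- ===== PORT A =====
def triangle (base : Int) : Int := PySem.Int.floordiv (base * (base + 1)) 2

def triangle_cost (positions : List Int) (target : Int) : Int :=
  (positions.map (fun pos => triangle |pos - target|)).sum

def optimal_triangle_target (positions : List Int) : Int :=
  match PySem.List.min? positions (fun x => x), PySem.List.max? positions (fun x => x) with
  | some lo, some hi =>
    match PySem.List.min? (PySem.List.pyRange lo (hi + 1) 1) (fun t => triangle_cost positions t) with
    | some r => r
    | none => 0          -- unreachable: the range is nonempty since lo ≤ hi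
  | _, _ => 0            -- min()/max() of empty: ValueError, excluded by Pre_

-- ===== PORT B =====
def doubled_cost (positions : List Int) (target : Int) : Int :=
  (positions.map (fun p => (p - target) * (p - target) + |p - target|)).sum

def bsearch (positions : List Int) (lo hi : Int) : Int :=
  if h : lo < hi then
    let mid := PySem.Int.floordiv (lo + hi) 2
    if doubled_cost positions mid ≤ doubled_cost positions (mid + 1) then
      bsearch positions lo mid
    else
      bsearch positions (mid + 1) hi
  else lo
termination_by (hi - lo).toNat
decreasing_by
  · have hlt : PySem.Int.floordiv (lo + hi) 2 < hi := by
      rw [PySem.Int.floordiv_lt_iff_lt_mul (by omega)]; omega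
    omega
  · have hb := PySem.Int.floordiv_two_mid_bounds (le_of_lt h)
    omega

def optimal_triangle_target_alt (positions : List Int) : Int :=
  ((PySem.List.min? positions (fun x => x)).bind (fun lo =>
    (PySem.List.max? positions (fun x => x)).map (fun hi =>
      bsearch positions lo hi))).getD 0
  -- min()/max() of empty: ValueError, excluded by Pre_; getD's 0 is never reached on Pre_

-- ===== PRECONDITION & SPEC =====
-- Pre_ excludes only the empty list, on which A raises ValueError (min of empty sequence).
def Pre_optimal_triangle_target (positions : List Int) : Prop := positions ≠ []
instance (positions : List Int) : Decidable (Pre_optimal_triangle_target positions) := by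
  unfold Pre_optimal_triangle_target; infer_instance

def pvWitness_optimal_triangle_target : List Int := [2, 0, 5]

def Spec_optimal_triangle_target (positions : List Int) (out : Int) : Prop := out = optimal_triangle_target_alt positions
instance (positions : List Int) (out : Int) : Decidable (Spec_optimal_triangle_target positions out) := by unfold Spec_optimal_triangle_target; infer_instance

-- ===== CLAIM (what is proved, stated in full; the proofs are below) =====
def Claim_equal_optimal_triangle_target : Prop := ∀ (positions : List Int), Dom_optimal_triangle_target positions → Pre_optimal_triangle_target positions → Spec_optimal_triangle_target positions (optimal_triangle_target positions)

-- ===== LEMMAS AND PROOFS =====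

-- per-element: the doubled triangle cost of a distance d
lemma two_triangle_abs (d : Int) : 2 * triangle |d| = d * d + |d| := by
  have habs : |d| * |d| = d * d := abs_mul_abs_self d
  obtain ⟨k, hk⟩ := Int.even_mul_succ_self |d|
  have h2 : triangle |d| = (|d| * (|d| + 1)) / 2 := by
    unfold triangle
    exact PySem.Int.floordiv_eq_ediv_of_pos (by norm_num)
  rw [h2]
  have hx : |d| * (|d| + 1) = d * d + |d| := by nlinarith [habs]
  omega

lemma doubled_eq (positions : List Int) (t : Int) :
    doubled_cost positions t = 2 * triangle_cost positions t := by
  induction positions with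
  | nil => simp [doubled_cost, triangle_cost]
  | cons p ps ih =>
    simp only [doubled_cost, triangle_cost, List.map_cons, List.sum_cons] at *
    rw [ih]; have := two_triangle_abs (p - t); ring_nf at this ⊢; omega

-- strict convexity of the doubled cost (second difference ≥ 2 per element)
lemma cconv (d : Int) :
    2 * (d * d + |d|) + 2 ≤ ((d - 1) * (d - 1) + |d - 1|) + ((d + 1) * (d + 1) + |d + 1|) := by
  rcases le_or_gt 1 d with h | h
  · rw [abs_of_nonneg (by omega : (0:Int) ≤ d), abs_of_nonneg (by omega : (0:Int) ≤ d - 1),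
      abs_of_nonneg (by omega : (0:Int) ≤ d + 1)]
    nlinarith
  · rcases le_or_gt d (-1) with h2 | h2
    · rw [abs_of_nonpos (by omega : d ≤ 0), abs_of_nonpos (by omega : d - 1 ≤ 0),
        abs_of_nonpos (by omega : d + 1 ≤ 0)]
      nlinarith
    · have hd : d = 0 := by omega
      subst hd; norm_num

lemma conv_sum (positions : List Int) (t : Int) :
    2 * doubled_cost positions (t + 1) + 2 * positions.length ≤
      doubled_cost positions t + doubled_cost positions (t + 2) := by
  induction positions with
  | nil => simp [doubled_cost]
  | cons p ps ih =>
    simp only [doubled_cost, List.map_cons, List.sum_cons, List.length_cons] at *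
    have h := cconv (p - (t + 1))
    have e1 : p - (t + 1) - 1 = p - (t + 2) := by ring
    have e2 : p - (t + 1) + 1 = p - t := by ring
    rw [e1, e2] at h
    push_cast
    nlinarith

-- P t := doubled_cost t ≤ doubled_cost (t+1); monotone upward
lemma P_mono (positions : List Int) (t : Int)
    (h : doubled_cost positions t ≤ doubled_cost positions (t + 1)) :
    doubled_cost positions (t + 1) ≤ doubled_cost positions (t + 2) := by
  have hc := conv_sum positions t
  have hn : (0:Int) ≤ 2 * positions.length := by positivity
  linarith

lemma P_up (positions : List Int) (k : Nat) (t : Int)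
    (h : doubled_cost positions t ≤ doubled_cost positions (t + 1)) :
    doubled_cost positions t ≤ doubled_cost positions (t + k) ∧
      doubled_cost positions (t + k) ≤ doubled_cost positions (t + k + 1) := by
  induction k with
  | zero => simp only [Nat.cast_zero, add_zero]; exact ⟨le_rfl, h⟩
  | succ n ih =>
    obtain ⟨h1, h2⟩ := ih
    have h3 := P_mono positions (t + n) h2
    have e : t + ((n:Nat) + 1 : Nat) = t + n + 1 := by push_cast; ring
    rw [e]
    refine ⟨le_trans h1 h2, ?_⟩
    have e2 : t + n + 1 + 1 = t + n + 2 := by ring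
    rw [e2]; exact h3

-- strict decrease over a region where the predicate fails
lemma P_down (positions : List Int) (k : Nat) (u : Int)
    (h : ∀ v, u ≤ v → v < u + k → ¬ doubled_cost positions v ≤ doubled_cost positions (v + 1)) :
    doubled_cost positions (u + k) ≤ doubled_cost positions u ∧
      (0 < k → doubled_cost positions (u + k) < doubled_cost positions u) := by
  induction k generalizing u with
  | zero => simp
  | succ n ih =>
    have hu : ¬ doubled_cost positions u ≤ doubled_cost positions (u + 1) := by
      apply h u le_rfl; push_cast; omega
    have ih' := ih (u + 1) (by
      intro v hv1 hv2
      apply h v (by omega)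
      push_cast at hv2 ⊢; omega)
    obtain ⟨ih1, -⟩ := ih'
    have e : u + ((n:Nat) + 1 : Nat) = u + 1 + n := by push_cast; ring
    rw [e]
    exact ⟨by omega, fun _ => by omega⟩

-- if the predicate fails at m it fails at every u ≤ m
lemma P_not_below (positions : List Int) (u m : Int) (hum : u ≤ m)
    (hm : ¬ doubled_cost positions m ≤ doubled_cost positions (m + 1)) :
    ¬ doubled_cost positions u ≤ doubled_cost positions (u + 1) := by
  intro hu
  apply hm
  have h := (P_up positions (m - u).toNat u hu).2
  rwa [Int.toNat_of_nonneg (by omega), add_sub_cancel] at h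

-- bsearch returns the least t in [lo,hi] satisfying the predicate (or hi)
lemma bsearch_spec (positions : List Int) (lo hi : Int) (hle : lo ≤ hi) :
    lo ≤ bsearch positions lo hi ∧ bsearch positions lo hi ≤ hi ∧
      (∀ u, lo ≤ u → u < bsearch positions lo hi →
        ¬ doubled_cost positions u ≤ doubled_cost positions (u + 1)) ∧
      (bsearch positions lo hi = hi ∨
        doubled_cost positions (bsearch positions lo hi) ≤
          doubled_cost positions (bsearch positions lo hi + 1)) := by
  induction lo, hi using bsearch.induct positions with
  | case1 lo hi hlt mid hP ih =>
    have hm : mid = PySem.Int.floordiv (lo + hi) 2 := rfl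
    rw [hm] at hP ih
    have hb := PySem.Int.floordiv_two_mid_bounds (le_of_lt hlt)
    rw [bsearch]
    simp only [dif_pos hlt, if_pos hP]
    obtain ⟨i1, i2, i3, i4⟩ := ih hb.1
    refine ⟨i1, le_trans i2 hb.2, i3, ?_⟩
    rcases i4 with h | h
    · right; rw [h]; exact hP
    · right; exact h
  | case2 lo hi hlt mid hP ih =>
    have hm : mid = PySem.Int.floordiv (lo + hi) 2 := rfl
    rw [hm] at hP ih
    have hb := PySem.Int.floordiv_two_mid_bounds (le_of_lt hlt)
    have hmidlt : PySem.Int.floordiv (lo + hi) 2 < hi := by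
      rw [PySem.Int.floordiv_lt_iff_lt_mul (by omega)]; omega
    rw [bsearch]
    simp only [dif_pos hlt, if_neg hP]
    obtain ⟨i1, i2, i3, i4⟩ := ih (by omega)
    refine ⟨by omega, i2, ?_, i4⟩
    intro u hu1 hu2
    rcases le_or_gt u (PySem.Int.floordiv (lo + hi) 2) with hc | hc
    · exact P_not_below positions u _ hc hP
    · exact i3 u (by omega) hu2
  | case3 lo hi hlt =>
    rw [bsearch]
    simp only [dif_neg hlt]
    exact ⟨le_rfl, hle, fun u h1 h2 => absurd (lt_of_le_of_lt h1 h2) (lt_irrefl _), Or.inl (by omega)⟩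

-- min?'s folding step, named so the fold can be reasoned about
def minStep (key : Int → Int) (acc : Option Int) (x : Int) : Option Int :=
  match acc with
  | none => some x
  | some m => if key x < key m then some x else some m

lemma min?_eq_foldl_minStep (key : Int → Int) (l : List Int) :
    PySem.List.min? l key = l.foldl (minStep key) none := by
  unfold PySem.List.min?
  congr 1
  funext acc x
  cases acc <;> rfl

-- folding keeps an accumulator that is already minimal
lemma foldl_minStep_keep (key : Int → Int) (l : List Int) (r : Int)
    (h : ∀ y ∈ l, key r ≤ key y) :
    l.foldl (minStep key) (some r) = some r := by
  induction l with
  | nil => rfl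
  | cons y l ih =>
    have hy : ¬ key y < key r := not_lt.mpr (h y (List.mem_cons_self))
    simp only [List.foldl_cons, minStep, if_neg hy]
    exact ih (fun z hz => h z (List.mem_cons_of_mem _ hz))

-- min? over l1 ++ r :: l2 is r when r beats l1 strictly and l2 weakly
lemma min?_first (l1 l2 : List Int) (r : Int) (key : Int → Int)
    (h1 : ∀ y ∈ l1, key r < key y) (h2 : ∀ y ∈ l2, key r ≤ key y) :
    PySem.List.min? (l1 ++ r :: l2) key = some r := by
  rw [min?_eq_foldl_minStep, List.foldl_append, List.foldl_cons]
  rcases hm : List.foldl (minStep key) none l1 with _ | m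
  · exact foldl_minStep_keep key l2 r h2
  · have hmem : m ∈ l1 := by
      apply PySem.List.min?_mem (key := key)
      rw [min?_eq_foldl_minStep]
      exact hm
    have hlt : key r < key m := h1 m hmem
    simp only [minStep, if_pos hlt]
    exact foldl_minStep_keep key l2 r h2

-- ===== VERDICT (by name: the statement is the Claim_ definition above) =====
theorem optimal_triangle_target_spec : Claim_equal_optimal_triangle_target := by
  intro positions _hdom hpre
  unfold Pre_optimal_triangle_target at hpre
  unfold Spec_optimal_triangle_target
  rcases hmin : PySem.List.min? positions (fun x => x) with _ | lo
  · rw [PySem.List.min?_eq_none_iff] at hmin; exact absurd hmin hpre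
  rcases hmax : PySem.List.max? positions (fun x => x) with _ | hi
  · rw [PySem.List.max?_eq_none_iff] at hmax; exact absurd hmax hpre
  have hlomem : lo ∈ positions := PySem.List.min?_mem hmin
  have hlohi : lo ≤ hi := PySem.List.max?_isMax hmax lo hlomem
  obtain ⟨s1, s2, s3, s4⟩ := bsearch_spec positions lo hi hlohi
  set r := bsearch positions lo hi with hr
  -- the scanned range splits at r
  have hsplit : PySem.List.pyRange lo (hi + 1) 1 =
      PySem.List.pyRange lo r 1 ++ (r :: PySem.List.pyRange (r + 1) (hi + 1) 1) := by
    have hcons : PySem.List.pyRange r (hi + 1) 1 = r :: PySem.List.pyRange (r + 1) (hi + 1) 1 :=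
      PySem.List.pyRange_one_cons (by omega)
    rw [PySem.List.pyRange_one_append lo r (hi + 1) s1 (by omega), hcons]
  have hminr : PySem.List.min? (PySem.List.pyRange lo (hi + 1) 1)
      (fun t => triangle_cost positions t) = some r := by
    rw [hsplit]
    apply min?_first
    · intro y hy
      rw [PySem.List.mem_pyRange_one] at hy
      have hd := P_down positions (r - y).toNat y (by
        intro v hv1 hv2
        rw [Int.toNat_of_nonneg (by omega)] at hv2
        exact s3 v (by omega) (by omega))
      rw [Int.toNat_of_nonneg (by omega), add_sub_cancel] at hd
      have hlt := hd.2 (by omega)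
      have e1 := doubled_eq positions r
      have e2 := doubled_eq positions y
      omega
    · intro y hy
      rw [PySem.List.mem_pyRange_one] at hy
      have hPr : doubled_cost positions r ≤ doubled_cost positions (r + 1) := by
        rcases s4 with h | h
        · omega
        · exact h
      have hup := (P_up positions (y - r).toNat r hPr).1
      rw [Int.toNat_of_nonneg (by omega), add_sub_cancel] at hup
      have e1 := doubled_eq positions r
      have e2 := doubled_eq positions y
      omega
  simp only [optimal_triangle_target, optimal_triangle_target_alt, hmin, hmax, hminr]
  exact hr
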